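-- pv_equiv track=rewrite | github.com/4ashutosh98/documind | backend/chunking/markdown_chunker.py | _heading_at
-- ===== SOURCE A (Python) =====
-- def _heading_at(
--     heading_index: list[tuple[int, int, str]],
--     pos: int,
-- ) -> tuple[str | None, str | None]:
--     """
--     Find the section and breadcrumb provenance for a chunk at character offset ``pos``.
--
--     Walks the heading index maintaining an ancestor stack.  A heading is
--     "active" for any position that comes after it and before the next heading
--     of the same or higher level.
--
--     Example:
--         # Chapter 1         (pos 0)
--         ## Section 1.1      (pos 100)
--         ### Subsection 1.1.1 (pos 200)
--
--         For a chunk at pos=250: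
--           section    = "Subsection 1.1.1"
--           breadcrumb = "Chapter 1 > Section 1.1"
--
--     Args:
--         heading_index: Output of ``_build_heading_index``.
--         pos:           Character offset of the chunk's first character.
--
--     Returns:
--         (section, breadcrumb) where:
--           section    — most recent (innermost) heading text, or None
--           breadcrumb — " > "-joined ancestor headings (excluding section),
--                        or None if there are no ancestors
--     """
--     stack: list[tuple[int, str]] = []  # (level, heading_text)
--
--     for h_pos, level, heading_text in heading_index:
--         if h_pos > pos:
--             # All remaining headings come after this chunk — stop
--             break
--         # Pop any headings at the same or deeper level than this one;
--         # they are no longer active ancestors once we encounter a sibling/parent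
--         stack = [(l, h) for l, h in stack if l < level]
--         stack.append((level, heading_text))
--
--     if not stack:
--         return None, None   # chunk precedes any heading
--
--     section = stack[-1][1]  # innermost (most recent) heading
--     # Breadcrumb = all ancestors except the section itself, joined with " > "
--     breadcrumb = " > ".join(h for _, h in stack[:-1]) if len(stack) > 1 else None
--     return section, breadcrumb
-- ===== SOURCE B (Python) =====
-- def _heading_at(
--     heading_index: list[tuple[int, int, str]],
--     pos: int,
-- ) -> tuple[str | None, str | None]:
--     # Collect the headings at or before pos (A's loop stops at the first later one).
--     visible = []
--     for h in heading_index: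
--         if h[0] > pos:
--             break
--         visible.append(h)
--     if not visible:
--         return None, None
--     _, cur, section = visible[-1]
--     # Single backward walk: an ancestor is each heading whose level strictly
--     # drops below everything seen since the section.
--     crumbs = []
--     for _, level, text in reversed(visible[:-1]):
--         if level < cur:
--             crumbs.append(text)
--             cur = level
--     crumbs.reverse()
--     return section, (" > ".join(crumbs) if crumbs else None)
-- ===== Notes on version B (the rewrite author's own statement) =====
-- stated objective: alternative
-- what changed: Instead of rebuilding the ancestor stack (a filter pass) at every heading, B takes the visible prefix and reconstructs the ancestor chain with one backward walk over strictly decreasing levels.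
import Mathlib
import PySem

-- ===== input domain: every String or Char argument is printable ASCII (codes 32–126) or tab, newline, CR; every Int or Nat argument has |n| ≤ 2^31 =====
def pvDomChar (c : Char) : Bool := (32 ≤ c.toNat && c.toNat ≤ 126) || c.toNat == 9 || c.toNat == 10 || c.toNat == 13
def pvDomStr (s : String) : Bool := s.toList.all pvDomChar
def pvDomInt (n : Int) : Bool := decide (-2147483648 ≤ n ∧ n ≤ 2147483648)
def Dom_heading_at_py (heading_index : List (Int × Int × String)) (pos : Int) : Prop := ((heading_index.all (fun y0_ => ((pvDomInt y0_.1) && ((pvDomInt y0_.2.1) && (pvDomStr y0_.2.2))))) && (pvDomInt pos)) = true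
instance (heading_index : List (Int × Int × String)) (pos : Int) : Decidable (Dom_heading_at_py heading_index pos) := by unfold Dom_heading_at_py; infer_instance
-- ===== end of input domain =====

-- B replaces A's per-heading stack rebuild with a visible-prefix scan plus one
-- backward walk over strictly decreasing levels (alternative decomposition).


-- ===== PORT A =====
-- A's loop: for each heading at or before pos, filter the stack to levels < level, push.
def headingAtLoop (pos : Int) (stack : List (Int × String)) :
    List (Int × Int × String) → List (Int × String)
  | [] => stack
  | (h_pos, level, text) :: rest =>
      if h_pos > pos then stack
      else headingAtLoop pos ((stack.filter (fun x => x.1 < level)) ++ [(level, text)]) rest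

def heading_at_py (heading_index : List (Int × Int × String)) (pos : Int) :
    Option String × Option String :=
  let stack := headingAtLoop pos [] heading_index
  match stack.getLast? with
  | none => (none, none)   -- chunk precedes any heading
  | some last =>
      (some last.2,
       if stack.length > 1 then some (PySem.Str.join " > " (stack.dropLast.map (·.2)))
       else none)

-- ===== PORT B =====
-- headings at or before pos (loop with break)
def altVisible (pos : Int) : List (Int × Int × String) → List (Int × Int × String)
  | [] => []
  | h :: rest => if h.1 > pos then [] else h :: altVisible pos rest

-- backward walk collecting texts of strictly decreasing levels
def altChain (cur : Int) : List (Int × Int × String) → List String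
  | [] => []
  | (_, level, text) :: rest =>
      if level < cur then text :: altChain level rest else altChain cur rest

def heading_at_py_alt (heading_index : List (Int × Int × String)) (pos : Int) :
    Option String × Option String :=
  let visible := altVisible pos heading_index
  match visible.getLast? with
  | none => (none, none)
  | some (_, cur, sec) =>
      let crumbs := (altChain cur visible.dropLast.reverse).reverse
      (some sec, if crumbs = [] then none else some (PySem.Str.join " > " crumbs))

-- ===== PRECONDITION & SPEC =====
def Spec_heading_at_py (heading_index : List (Int × Int × String)) (pos : Int) (out : Option String × Option String) : Prop := out = heading_at_py_alt heading_index pos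
instance (heading_index : List (Int × Int × String)) (pos : Int) (out : Option String × Option String) : Decidable (Spec_heading_at_py heading_index pos out) := by unfold Spec_heading_at_py; infer_instance

-- ===== CLAIM (what is proved, stated in full; the proofs are below) =====
def Claim_equal_heading_at_py : Prop := ∀ (heading_index : List (Int × Int × String)) (pos : Int), Dom_heading_at_py heading_index pos → Spec_heading_at_py heading_index pos (heading_at_py heading_index pos)

-- ===== LEMMAS AND PROOFS =====

-- A's step, as a fold function
def hstep (s : List (Int × String)) (h : Int × Int × String) : List (Int × String) :=
  (s.filter (fun x => x.1 < h.2.1)) ++ [(h.2.1, h.2.2)]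

lemma headingAtLoop_eq_foldl (pos : Int) (s : List (Int × String)) :
    ∀ xs : List (Int × Int × String),
      headingAtLoop pos s xs = (altVisible pos xs).foldl hstep s := by
  intro xs
  induction xs generalizing s with
  | nil => simp [headingAtLoop, altVisible]
  | cons h rest ih =>
      obtain ⟨p, l, t⟩ := h
      by_cases hp : p > pos
      · simp [headingAtLoop, altVisible, hp]
      · simp [headingAtLoop, altVisible, hp, ih, hstep]

-- the final stack's texts below level l are exactly the backward chain, reversed
lemma foldl_filter_eq_chain :
    ∀ (Q : List (Int × Int × String)) (l : Int),
      ((Q.foldl hstep []).filter (fun x => x.1 < l)).map Prod.snd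
        = (altChain l Q.reverse).reverse := by
  intro Q
  induction Q using List.reverseRecOn with
  | nil => intro l; simp [altChain]
  | append_singleton R h ih =>
      intro l
      obtain ⟨p, m, t⟩ := h
      rw [List.foldl_append]
      simp only [List.foldl_cons, List.foldl_nil, hstep, List.reverse_append,
        List.reverse_cons, List.reverse_nil, List.nil_append, List.cons_append,
        altChain]
      by_cases hm : m < l
      · simp only [if_pos hm, List.filter_append, List.filter_filter]
        have hf : (R.foldl hstep []).filter (fun x => decide (x.1 < l) && decide (x.1 < m))
            = (R.foldl hstep []).filter (fun x => x.1 < m) := by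
          apply List.filter_congr
          intro x _
          by_cases hx : x.1 < m
          · simp [hx, lt_trans hx hm]
          · simp [hx]
        simp [hf, hm, ih m]
      · simp only [if_neg hm, List.filter_append, List.filter_filter]
        have hf : (R.foldl hstep []).filter (fun x => decide (x.1 < l) && decide (x.1 < m))
            = (R.foldl hstep []).filter (fun x => x.1 < l) := by
          apply List.filter_congr
          intro x _
          by_cases hx : x.1 < l
          · have : x.1 < m := lt_of_lt_of_le hx (not_lt.mp hm)
            simp [hx, this]
          · simp [hx]
        simp [hf, hm, ih l]

lemma foldl_hstep_last (R : List (Int × Int × String)) (p l : Int) (t : String) :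
    ((R ++ [(p, l, t)]).foldl hstep [])
      = ((R.foldl hstep []).filter (fun x => x.1 < l)) ++ [(l, t)] := by
  rw [List.foldl_append]; rfl

-- ===== VERDICT (by name: the statement is the Claim_ definition above) =====
theorem heading_at_py_spec : Claim_equal_heading_at_py := by
  intro heading_index pos _
  unfold Spec_heading_at_py heading_at_py heading_at_py_alt
  rw [headingAtLoop_eq_foldl]
  generalize hV : altVisible pos heading_index = V
  induction V using List.reverseRecOn with
  | nil => simp
  | append_singleton R h _ =>
      obtain ⟨p, l, t⟩ := h
      rw [foldl_hstep_last]
      have hchain := foldl_filter_eq_chain R l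
      set C := (R.foldl hstep []).filter (fun x => x.1 < l) with hC
      simp only [List.getLast?_append, List.getLast?_singleton,
        List.dropLast_concat]
      simp only [Option.some_or]
      rw [show (altChain l R.reverse).reverse = C.map Prod.snd from hchain.symm]
      refine Prod.ext rfl ?_
      by_cases hc : C = []
      · rw [hc]; simp
      · have h1 : (C ++ [(l, t)]).length > 1 := by
          have := List.length_pos_iff.mpr hc
          simp; omega
        have h2 : C.map Prod.snd ≠ [] := by simp [hc]
        simp only [if_pos h1, if_neg h2]
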